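-- pv_equiv track=rewrite | github.com/olivier555/Projet-MOPSI | Niveau.py | collier_fil_coupe
-- ===== SOURCE A (Python) =====
-- def collier_fil_coupe(list_fil_visible):
--     """Renvoit la list correspondant a la repartition
--     de list_fil_visible"""
--
--     list = [1]
--     voleur = 1
--     for booleen in list_fil_visible:
--         if booleen:
--             list.append(voleur)
--         else:
--             voleur = - voleur
--             list.append(voleur)
--     return list
-- ===== SOURCE B (Python) =====
-- def collier_fil_coupe(list_fil_visible):
--     """Renvoit la list correspondant a la repartition
--     de list_fil_visible"""
--     cuts = [i + 1 for i, b in enumerate(list_fil_visible) if not b]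
--     bounds = [0] + cuts + [len(list_fil_visible) + 1]
--     out = []
--     for k, (a, b) in enumerate(zip(bounds, bounds[1:])):
--         out += [(-1) ** k] * (b - a)
--     return out
-- ===== Notes on version B (the rewrite author's own statement) =====
-- stated objective: alternative
-- what changed: Replaces the single toggling pass with a staged run-length construction: first collect the positions of falsy flags as run boundaries, then emit constant-sign runs of alternating sign by replication.
import Mathlib
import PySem

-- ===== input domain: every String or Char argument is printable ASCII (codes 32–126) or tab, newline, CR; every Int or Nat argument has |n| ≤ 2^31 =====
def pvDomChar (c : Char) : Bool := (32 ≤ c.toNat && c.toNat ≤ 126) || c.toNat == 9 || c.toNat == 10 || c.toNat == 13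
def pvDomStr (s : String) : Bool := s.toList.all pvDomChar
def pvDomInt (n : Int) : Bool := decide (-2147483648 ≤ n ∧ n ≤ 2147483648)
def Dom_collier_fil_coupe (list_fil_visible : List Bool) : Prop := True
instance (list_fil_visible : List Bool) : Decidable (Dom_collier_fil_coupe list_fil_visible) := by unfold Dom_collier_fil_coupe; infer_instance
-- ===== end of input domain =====

-- B replaces A's single toggling pass by a staged run-length construction (collect the
-- falsy positions as run boundaries, then emit alternating constant-sign runs by
-- replication); objective: alternative.

-- ===== PORT A =====
-- forward pass: append voleur, toggling it on False
def collier_fil_coupe (list_fil_visible : List Bool) : List Int :=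
  (list_fil_visible.foldl
    (fun (st : List Int × Int) booleen =>
      if booleen then (st.1 ++ [st.2], st.2)
      else (st.1 ++ [-st.2], -st.2))
    ([1], 1)).1

-- ===== PORT B =====
-- staged: cuts = falsy positions + 1; bounds delimit the runs; emit run k as
-- [(-1) ** k] * (b - a).  The index k from enumerate is ≥ 0, so (-1) ** k = (-1) ^ k.toNat exactly.
def collier_fil_coupe_alt (list_fil_visible : List Bool) : List Int :=
  let cuts : List Int := (PySem.List.enumerate list_fil_visible).filterMap
    (fun p => if p.2 then none else some (p.1 + 1))
  let bounds : List Int := [0] ++ cuts ++ [(list_fil_visible.length : Int) + 1]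
  (PySem.List.enumerate (bounds.zip (PySem.List.slice bounds (some 1) none))).foldl
    (fun out kab => out ++ PySem.List.pyRepeat [(-1 : Int) ^ kab.1.toNat] (kab.2.2 - kab.2.1))
    []

-- ===== PRECONDITION & SPEC =====
def Spec_collier_fil_coupe (list_fil_visible : List Bool) (out : List Int) : Prop := out = collier_fil_coupe_alt list_fil_visible
instance (list_fil_visible : List Bool) (out : List Int) : Decidable (Spec_collier_fil_coupe list_fil_visible out) := by unfold Spec_collier_fil_coupe; infer_instance

-- ===== CLAIM (what is proved, stated in full; the proofs are below) =====
def Claim_equal_collier_fil_coupe : Prop := ∀ (list_fil_visible : List Bool), Dom_collier_fil_coupe list_fil_visible → Spec_collier_fil_coupe list_fil_visible (collier_fil_coupe list_fil_visible)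

-- ===== LEMMAS AND PROOFS =====

-- common reference: the cons-recursion both programs satisfy
def pvB (l : List Bool) : List Int :=
  l.foldr (fun booleen result =>
    if booleen then 1 :: result else 1 :: result.map (fun x => -x)) [1]

theorem pvB_head (l : List Bool) : ∃ t, pvB l = 1 :: t := by
  cases l with
  | nil => exact ⟨[], rfl⟩
  | cons b t => cases b <;> exact ⟨_, rfl⟩

-- A side: loop invariant — from state (acc, v), A's fold produces acc ++ tail of (v • pvB l)
theorem pv_key (l : List Bool) (acc : List Int) (v : Int) :
    (l.foldl
      (fun (st : List Int × Int) booleen =>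
        if booleen then (st.1 ++ [st.2], st.2)
        else (st.1 ++ [-st.2], -st.2))
      (acc, v)).1 = acc ++ ((pvB l).map (fun x => v * x)).tail := by
  induction l generalizing acc v with
  | nil => simp [pvB]
  | cons b t ih =>
    obtain ⟨r, hr⟩ := pvB_head t
    cases b with
    | true =>
      simp only [List.foldl, ih, pvB, List.foldr]
      rw [show (t.foldr (fun booleen result =>
        if booleen then 1 :: result else 1 :: result.map (fun x => -x)) [1]) = pvB t from rfl,
        hr]
      simp [List.append_assoc]
    | false =>
      simp only [List.foldl, ih, pvB, List.foldr]
      rw [show (t.foldr (fun booleen result =>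
        if booleen then 1 :: result else 1 :: result.map (fun x => -x)) [1]) = pvB t from rfl,
        hr]
      simp [List.map_map, Function.comp, mul_comm, List.append_assoc, mul_neg]

theorem pvA_eq_pvB (l : List Bool) : collier_fil_coupe l = pvB l := by
  unfold collier_fil_coupe
  rw [pv_key]
  obtain ⟨r, hr⟩ := pvB_head l
  simp [hr]

-- B side: the run emitter, recursively
def pvRuns : Nat → List Int → List Int
  | k, a :: b :: rest => List.replicate (b - a).toNat ((-1 : Int) ^ k) ++ pvRuns (k + 1) (b :: rest)
  | _, _ => []

theorem pvRuns_shift (bs : List Int) (k : Nat) :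
    pvRuns k (bs.map (fun x => x + 1)) = pvRuns k bs := by
  induction bs generalizing k with
  | nil => rfl
  | cons a t ih =>
    cases t with
    | nil => rfl
    | cons b r =>
      simp only [List.map_cons, pvRuns]
      rw [show b + 1 - (a + 1) = b - a by ring,
        show (b + 1) :: List.map (fun x => x + 1) r = List.map (fun x => x + 1) (b :: r) from rfl,
        ih]

theorem pvRuns_neg (bs : List Int) (k : Nat) :
    pvRuns (k + 1) bs = (pvRuns k bs).map (fun x => -x) := by
  induction bs generalizing k with
  | nil => rfl
  | cons a t ih =>
    cases t with
    | nil => rfl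
    | cons b r =>
      simp only [pvRuns, List.map_append, List.map_replicate, ih (k + 1)]
      congr 2
      ring

-- prepending an all-true flag: the first run grows by one
theorem pvRuns_true_shift (B' : List Int) (h : ∀ x ∈ B', 1 ≤ x) (hne : B' ≠ []) :
    pvRuns 0 (0 :: B'.map (fun x => x + 1)) = 1 :: pvRuns 0 (0 :: B') := by
  obtain ⟨c, R, rfl⟩ := List.exists_cons_of_ne_nil hne
  have hc : 1 ≤ c := h c (by simp)
  rw [List.map_cons,
    show pvRuns 0 (0 :: (c + 1) :: List.map (fun x => x + 1) R)
      = List.replicate (c + 1 - 0).toNat ((-1 : Int) ^ 0) ++ pvRuns 1 ((c + 1) :: List.map (fun x => x + 1) R) from rfl,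
    show (c + 1) :: List.map (fun x => x + 1) R = List.map (fun x => x + 1) (c :: R) from by rw [List.map_cons],
    pvRuns_shift,
    show pvRuns 0 (0 :: c :: R) = List.replicate (c - 0).toNat ((-1 : Int) ^ 0) ++ pvRuns 1 (c :: R) from rfl]
  have h1 : (c + 1 - 0).toNat = (c - 0).toNat + 1 := by omega
  rw [h1, List.replicate_succ]
  simp

-- prepending a falsy flag: a run of length 1 followed by the negated rest
theorem pvRuns_false_shift (B' : List Int) :
    pvRuns 0 (0 :: 1 :: B'.map (fun x => x + 1)) = 1 :: (pvRuns 0 (0 :: B')).map (fun x => -x) := by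
  have : (1 : Int) :: B'.map (fun x => x + 1) = (0 :: B').map (fun x => x + 1) := by simp
  rw [show pvRuns 0 ((0 : Int) :: 1 :: B'.map (fun x => x + 1))
      = List.replicate ((1 : Int) - 0).toNat ((-1 : Int) ^ 0) ++ pvRuns 1 (1 :: B'.map (fun x => x + 1)) from rfl,
    this, pvRuns_shift, pvRuns_neg]
  simp

-- the port's fold over enumerate(zip(bounds, bounds[1:])) computes pvRuns
theorem pvFold_runs (bs : List Int) (k : Nat) (acc : List Int) :
    (PySem.List.enumerate (bs.zip (bs.drop 1)) (k : Int)).foldl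
      (fun out kab => out ++ PySem.List.pyRepeat [(-1 : Int) ^ kab.1.toNat] (kab.2.2 - kab.2.1))
      acc = acc ++ pvRuns k bs := by
  induction bs generalizing k acc with
  | nil => simp [pvRuns]
  | cons a t ih =>
    cases t with
    | nil => simp [pvRuns]
    | cons b r =>
      have hcast : ((k : Int) + 1) = ((k + 1 : Nat) : Int) := by push_cast; ring
      simp only [List.drop_one, List.tail_cons, List.zip_cons_cons,
        PySem.List.enumerate_cons, List.foldl_cons, hcast]
      rw [show (b :: r).zip r = (b :: r).zip ((b :: r).drop 1) by simp, ih (k + 1)]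
      simp [pvRuns, PySem.List.pyRepeat_singleton, List.append_assoc]

-- the cut positions, with general enumerate start
def pvCuts (l : List Bool) (s : Int) : List Int :=
  (PySem.List.enumerate l s).filterMap (fun p => if p.2 then none else some (p.1 + 1))

theorem pvCuts_true (t : List Bool) (s : Int) : pvCuts (true :: t) s = pvCuts t (s + 1) := by
  simp [pvCuts, PySem.List.enumerate_cons]

theorem pvCuts_false (t : List Bool) (s : Int) :
    pvCuts (false :: t) s = (s + 1) :: pvCuts t (s + 1) := by
  simp [pvCuts, PySem.List.enumerate_cons]

theorem pvCuts_shift (l : List Bool) (s : Int) :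
    pvCuts l (s + 1) = (pvCuts l s).map (fun x => x + 1) := by
  induction l generalizing s with
  | nil => rfl
  | cons b t ih =>
    cases b with
    | true => rw [pvCuts_true, pvCuts_true, ih]
    | false =>
      rw [pvCuts_false, pvCuts_false, ih, List.map_cons]

theorem pvCuts_pos (l : List Bool) (s : Int) : ∀ x ∈ pvCuts l s, s + 1 ≤ x := by
  induction l generalizing s with
  | nil => intro x hx; simp [pvCuts, PySem.List.enumerate] at hx
  | cons b t ih =>
    intro x hx
    cases b with
    | true =>
      rw [pvCuts_true] at hx
      have := ih (s + 1) x hx; omega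
    | false =>
      rw [pvCuts_false] at hx
      rcases List.mem_cons.1 hx with h | h
      · omega
      · have := ih (s + 1) x h; omega

-- the port, expressed through pvRuns
theorem pvAlt_eq (l : List Bool) :
    collier_fil_coupe_alt l = pvRuns 0 (0 :: (pvCuts l 0 ++ [(l.length : Int) + 1])) := by
  unfold collier_fil_coupe_alt
  have hslice : ∀ bs : List Int, PySem.List.slice bs (some 1) none = bs.drop 1 := by
    intro bs
    have := PySem.List.slice_from_natCast (xs := bs) (a := 1)
    simpa using this
  simp only [hslice]
  have := pvFold_runs (0 :: (pvCuts l 0 ++ [(l.length : Int) + 1])) 0 []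
  simpa [pvCuts] using this

theorem pvBounds_pos (t : List Bool) :
    ∀ x ∈ pvCuts t 0 ++ [(t.length : Int) + 1], 1 ≤ x := by
  intro x hx
  rcases List.mem_append.1 hx with h | h
  · have := pvCuts_pos t 0 x h; omega
  · have : x = (t.length : Int) + 1 := by simpa using h
    have : (0 : Int) ≤ (t.length : Int) := Int.natCast_nonneg _
    omega

theorem pvAlt_true (t : List Bool) :
    collier_fil_coupe_alt (true :: t) = 1 :: collier_fil_coupe_alt t := by
  rw [pvAlt_eq, pvAlt_eq]
  have hbounds : pvCuts (true :: t) 0 ++ [((true :: t).length : Int) + 1]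
      = (pvCuts t 0 ++ [(t.length : Int) + 1]).map (fun x => x + 1) := by
    rw [pvCuts_true, show (0 : Int) + 1 = 0 + 1 from rfl, pvCuts_shift]
    simp
  rw [hbounds, pvRuns_true_shift _ (pvBounds_pos t) (by simp)]

theorem pvAlt_false (t : List Bool) :
    collier_fil_coupe_alt (false :: t) = 1 :: (collier_fil_coupe_alt t).map (fun x => -x) := by
  rw [pvAlt_eq, pvAlt_eq]
  have hbounds : pvCuts (false :: t) 0 ++ [((false :: t).length : Int) + 1]
      = 1 :: (pvCuts t 0 ++ [(t.length : Int) + 1]).map (fun x => x + 1) := by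
    rw [pvCuts_false, show (0 : Int) + 1 = 0 + 1 from rfl, pvCuts_shift]
    simp
  rw [hbounds, pvRuns_false_shift]

theorem pvAlt_eq_pvB (l : List Bool) : collier_fil_coupe_alt l = pvB l := by
  induction l with
  | nil => decide
  | cons b t ih =>
    cases b with
    | true => rw [pvAlt_true, ih]; rfl
    | false => rw [pvAlt_false, ih]; rfl

-- ===== VERDICT (by name: the statement is the Claim_ definition above) =====
theorem collier_fil_coupe_spec : Claim_equal_collier_fil_coupe := by
  intro l _
  unfold Spec_collier_fil_coupe
  rw [pvA_eq_pvB, pvAlt_eq_pvB]
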